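-- pv_equiv track=rewrite | github.com/drhagen/tensora | src/tensora/tensor.py | default_aos_dimensions
-- ===== SOURCE A (Python) =====
-- from typing import List, Tuple, Dict, Iterable, Union, Any, Iterator, Optional
--
-- def default_aos_dimensions(coordinates: Iterable[Tuple[int, ...]]) -> Tuple[int, ...]:
--     order = None
--     maximums = []
--     for coordinate in coordinates:
--         if order is None:
--             order = len(coordinate)
--             maximums = list(coordinate)
--         else:
--             if len(coordinate) != order:
--                 raise ValueError(f'All coordinates must be the same length; the first coordinate has length'
--                                  f'{order}, but this coordinate is not that length: {coordinate}')
--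
--             for i, (dimension, index) in enumerate(zip(maximums, coordinate)):
--                 if index > dimension:
--                     maximums[i] = coordinate[i]
--
--     # i+ 1 is the length of a dimension whose largest index is i
--     return tuple(i + 1 for i in maximums)
-- ===== SOURCE B (Python) =====
-- def default_aos_dimensions(coordinates):
--     coords = list(coordinates)
--     if not coords:
--         return ()
--     order = len(coords[0])
--     for coordinate in coords:
--         if len(coordinate) != order:
--             raise ValueError(f'All coordinates must be the same length; the first coordinate has length'
--                              f'{order}, but this coordinate is not that length: {coordinate}')
--     maximums = [max(col) for col in zip(*coords)]
--     return tuple(m + 1 for m in maximums)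
-- ===== Notes on version B (the rewrite author's own statement) =====
-- stated objective: alternative
-- what changed: Replaces the row-wise running-maximum accumulator mutated in place with a transpose (zip(*coords)) followed by a column-wise max; same ValueError on length mismatch, which Pre_ excludes.
import Mathlib
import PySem

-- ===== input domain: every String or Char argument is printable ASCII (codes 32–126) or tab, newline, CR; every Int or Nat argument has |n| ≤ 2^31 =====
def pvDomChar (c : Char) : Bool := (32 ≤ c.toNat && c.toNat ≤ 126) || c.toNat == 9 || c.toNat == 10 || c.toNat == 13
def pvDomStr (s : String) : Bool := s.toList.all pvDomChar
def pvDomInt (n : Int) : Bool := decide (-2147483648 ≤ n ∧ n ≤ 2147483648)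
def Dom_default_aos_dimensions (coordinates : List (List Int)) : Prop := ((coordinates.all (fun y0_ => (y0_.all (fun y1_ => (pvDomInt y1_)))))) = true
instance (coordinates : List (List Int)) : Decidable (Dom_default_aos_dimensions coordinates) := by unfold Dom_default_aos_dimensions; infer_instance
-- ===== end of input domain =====

-- B transposes the coordinates and takes a column-wise max instead of A's row-wise running-maximum accumulator; equal return values on Pre_ (all rows same length).

-- ===== PORT A =====
-- A's loop state: (order, maximums); on a length mismatch Python raises (excluded by Pre_; the port leaves the state unchanged there).
def pvAStep (st : Option Int × List Int) (c : List Int) : Option Int × List Int :=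
  match st.1 with
  | none => (some (c.length : Int), c)
  | some o =>
      if (c.length : Int) ≠ o then st
      else (some o, List.zipWith (fun d x => if x > d then x else d) st.2 c)

def default_aos_dimensions (coordinates : List (List Int)) : List Int :=
  let st := coordinates.foldl pvAStep (none, [])
  st.2.map (fun i => i + 1)

-- ===== PORT B =====
-- python max over a nonempty tuple (the [] case is unreachable in B)
def pvMax : List Int → Int
  | [] => 0
  | x :: xs => xs.foldl max x

-- zip(*rows): pull one head from every row per step, stop when any row is exhausted
def pvZipStar (rows : List (List Int)) : List (List Int) :=
  if rows.isEmpty || rows.any (·.isEmpty) then []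
  else (rows.map (·.headI)) :: pvZipStar (rows.map (·.tail))
termination_by rows.headI.length
decreasing_by
  rename_i h
  simp only [Bool.or_eq_true, List.isEmpty_iff, List.any_eq_true, not_or] at h
  obtain ⟨h1, h2⟩ := h
  match rows with
  | [] => exact absurd rfl h1
  | a :: rs =>
    have ha : a ≠ [] := by
      intro hh
      exact h2 ⟨a, List.mem_cons_self, by simp [hh]⟩
    simp only [List.headI_cons]
    cases a with
    | nil => exact absurd rfl ha
    | cons x xs => simp

def default_aos_dimensions_alt (coordinates : List (List Int)) : List Int :=
  match coordinates with
  | [] => []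
  | first :: rest =>
      -- length validation: B raises here on mismatch (excluded by Pre_)
      if (first :: rest).all (fun c => c.length = first.length) then
        ((pvZipStar (first :: rest)).map pvMax).map (fun m => m + 1)
      else []

-- ===== PRECONDITION & SPEC =====
-- Pre_ excludes lists whose coordinates differ in length from the first: both A and B raise ValueError there.
def Pre_default_aos_dimensions (coordinates : List (List Int)) : Prop :=
  ∀ c ∈ coordinates, c.length = coordinates.headI.length
instance (coordinates : List (List Int)) : Decidable (Pre_default_aos_dimensions coordinates) := by unfold Pre_default_aos_dimensions; infer_instance

def pvWitness_default_aos_dimensions : List (List Int) := [[0, 2], [3, 1], [1, 4]]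

def Spec_default_aos_dimensions (coordinates : List (List Int)) (out : List Int) : Prop := out = default_aos_dimensions_alt coordinates
instance (coordinates : List (List Int)) (out : List Int) : Decidable (Spec_default_aos_dimensions coordinates out) := by unfold Spec_default_aos_dimensions; infer_instance

-- ===== CLAIM (what is proved, stated in full; the proofs are below) =====
def Claim_equal_default_aos_dimensions : Prop := ∀ (coordinates : List (List Int)), Dom_default_aos_dimensions coordinates → Pre_default_aos_dimensions coordinates → Spec_default_aos_dimensions coordinates (default_aos_dimensions coordinates)

-- ===== LEMMAS AND PROOFS =====

-- list equality by length + getD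
theorem pv_ext_getD {l1 l2 : List Int} (hl : l1.length = l2.length)
    (h : ∀ j, j < l1.length → l1.getD j 0 = l2.getD j 0) : l1 = l2 := by
  apply List.ext_getElem hl
  intro j hj1 hj2
  have := h j hj1
  rwa [List.getD_eq_getElem _ _ hj1, List.getD_eq_getElem _ _ hj2] at this

theorem pv_zipWith_max_eq (a b : List Int) :
    List.zipWith (fun d x => if x > d then x else d) a b = List.zipWith max a b := by
  have : (fun (d x : Int) => if x > d then x else d) = fun d x => max d x := by
    funext d x; by_cases h : x > d <;> simp [h, max_def] <;> omega
  rw [this]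

-- A's fold, once started, stays in the some-branch under equal lengths
theorem pv_A_fold (k : Nat) :
    ∀ (rest : List (List Int)) (acc : List Int), acc.length = k →
    (∀ c ∈ rest, c.length = k) →
    rest.foldl pvAStep (some (k : Int), acc)
      = (some (k : Int), rest.foldl (fun m c => List.zipWith max m c) acc) := by
  intro rest
  induction rest with
  | nil => intro acc _ _; rfl
  | cons c cs ih =>
    intro acc hacc hlen
    have hc : c.length = k := hlen c List.mem_cons_self
    have hstep : pvAStep (some (k : Int), acc) c
        = (some (k : Int), List.zipWith max acc c) := by
      simp [pvAStep, hc, pv_zipWith_max_eq]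
    simp only [List.foldl_cons, hstep]
    exact ih (List.zipWith max acc c) (by simp [List.length_zipWith, hacc, hc])
      (fun d hd => hlen d (List.mem_cons_of_mem _ hd))

theorem pv_A_foldlen (k : Nat) :
    ∀ (rest : List (List Int)) (acc : List Int), acc.length = k →
    (∀ c ∈ rest, c.length = k) →
    (rest.foldl (fun m c => List.zipWith max m c) acc).length = k := by
  intro rest
  induction rest with
  | nil => intro acc h _; exact h
  | cons c cs ih =>
    intro acc hacc hlen
    simp only [List.foldl_cons]
    exact ih _ (by simp [List.length_zipWith, hacc, hlen c List.mem_cons_self])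
      (fun d hd => hlen d (List.mem_cons_of_mem _ hd))

theorem pv_getD_zipWith_max (a b : List Int) (j : Nat) (hj : j < a.length) (hj' : j < b.length) :
    (List.zipWith max a b).getD j 0 = max (a.getD j 0) (b.getD j 0) := by
  have h : j < (List.zipWith max a b).length := by simp [List.length_zipWith]; omega
  rw [List.getD_eq_getElem _ _ h, List.getD_eq_getElem _ _ hj, List.getD_eq_getElem _ _ hj',
    List.getElem_zipWith]

theorem pv_A_fold_getD (k : Nat) (j : Nat) (hj : j < k) :
    ∀ (rest : List (List Int)) (acc : List Int), acc.length = k →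
    (∀ c ∈ rest, c.length = k) →
    (rest.foldl (fun m c => List.zipWith max m c) acc).getD j 0
      = rest.foldl (fun m c => max m (c.getD j 0)) (acc.getD j 0) := by
  intro rest
  induction rest with
  | nil => intro acc _ _; rfl
  | cons c cs ih =>
    intro acc hacc hlen
    have hc : c.length = k := hlen c List.mem_cons_self
    simp only [List.foldl_cons]
    rw [ih _ (by simp [List.length_zipWith, hacc, hc])
        (fun d hd => hlen d (List.mem_cons_of_mem _ hd)),
      pv_getD_zipWith_max acc c j (by omega) (by omega)]

-- B's transpose characterised by columns, for equal-length rows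
theorem pv_getD_tail (r : List Int) (j : Nat) : r.tail.getD j 0 = r.getD (j + 1) 0 := by
  cases r <;> simp

theorem pv_headI_eq_getD (r : List Int) : r.headI = r.getD 0 0 := by
  cases r <;> simp

theorem pv_zipStar_spec (k : Nat) :
    ∀ (rows : List (List Int)), rows ≠ [] → (∀ r ∈ rows, r.length = k) →
    pvZipStar rows = (List.range k).map (fun j => rows.map (fun r => r.getD j 0)) := by
  induction k with
  | zero =>
    intro rows hne hlen
    rw [pvZipStar]
    have : rows.isEmpty || rows.any (·.isEmpty) := by
      cases rows with
      | nil => simp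
      | cons a rs =>
        have := hlen a List.mem_cons_self
        simp [List.any_cons, List.length_eq_zero_iff.mp this]
    simp [this]
  | succ k ih =>
    intro rows hne hlen
    rw [pvZipStar]
    have hcond : (rows.isEmpty || rows.any (·.isEmpty)) = false := by
      simp only [Bool.or_eq_false_iff, List.isEmpty_eq_false_iff, List.any_eq_false]
      refine ⟨hne, fun r hr => ?_⟩
      have := hlen r hr
      simp [List.isEmpty_iff]
      intro h; rw [h] at this; simp at this
    rw [hcond]
    simp only [Bool.false_eq_true, if_false]
    have hne' : rows.map (·.tail) ≠ [] := by simp [hne]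
    have hlen' : ∀ r ∈ rows.map (·.tail), r.length = k := by
      intro r hr
      obtain ⟨s, hs, rfl⟩ := List.mem_map.mp hr
      have := hlen s hs
      simp [List.length_tail, this]
    rw [ih _ hne' hlen']
    rw [List.range_succ_eq_map]
    simp only [List.map_cons, List.map_map]
    congr 1
    · rw [List.map_congr_left]; intro r _; exact pv_headI_eq_getD r
    · apply List.map_congr_left
      intro j _
      simp only [Function.comp]
      apply List.map_congr_left
      intro r _
      exact pv_getD_tail r j

theorem pv_getD_range_map (k j : Nat) (f : Nat → List Int) (hj : j < k) :
    (((List.range k).map f).map pvMax).getD j 0 = pvMax (f j) := by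
  have h1 : j < (((List.range k).map f).map pvMax).length := by simp [hj]
  rw [List.getD_eq_getElem _ _ h1]
  simp

-- ===== VERDICT (by name: the statement is the Claim_ definition above) =====
theorem default_aos_dimensions_spec : Claim_equal_default_aos_dimensions := by
  intro coordinates _ hpre
  unfold Spec_default_aos_dimensions
  cases coordinates with
  | nil => rfl
  | cons first rest =>
    set k := first.length with hk
    have hlenall : ∀ c ∈ first :: rest, c.length = k := by
      intro c hc; exact hpre c hc
    have hlenrest : ∀ c ∈ rest, c.length = k :=
      fun c hc => hlenall c (List.mem_cons_of_mem _ hc)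
    -- A side
    have hA : default_aos_dimensions (first :: rest)
        = (rest.foldl (fun m c => List.zipWith max m c) first).map (fun i => i + 1) := by
      unfold default_aos_dimensions
      simp only [List.foldl_cons]
      have h0 : pvAStep (none, []) first = (some (k : Int), first) := rfl
      rw [h0, pv_A_fold k rest first rfl hlenrest]
    -- B side
    have hB : default_aos_dimensions_alt (first :: rest)
        = (((List.range k).map (fun j => (first :: rest).map (fun r => r.getD j 0))).map pvMax).map
            (fun m => m + 1) := by
      have hall : (first :: rest).all (fun c => c.length = first.length) = true := by
        simp only [List.all_eq_true]
        intro c hc; simp [hlenall c hc, hk]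
      simp only [default_aos_dimensions_alt, hall, if_true]
      rw [pv_zipStar_spec k (first :: rest) (by simp) hlenall]
    rw [hA, hB]
    congr 1
    apply pv_ext_getD
    · rw [pv_A_foldlen k rest first rfl hlenrest]; simp
    · intro j hj
      rw [pv_A_foldlen k rest first rfl hlenrest] at hj
      rw [pv_A_fold_getD k j hj rest first rfl hlenrest,
        pv_getD_range_map k j _ hj]
      simp only [List.map_cons, pvMax]
      rw [List.foldl_map]
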